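-- pv_equiv track=rewrite | github.com/fengyeying/UFailureSkill | ufailure_once.py | _canonical_installed_plugin_name
-- ===== SOURCE A (Python) =====
-- from typing import Any, Iterable
--
-- def _canonical_installed_plugin_name(plugin_name: str, installed_names: Iterable[str]) -> str | None:
--     installed = {name for name in installed_names if isinstance(name, str) and name}
--     if plugin_name in installed:
--         return plugin_name
--     for installed_name in sorted(installed, key=len, reverse=True):
--         if plugin_name.startswith(installed_name + "-"):
--             return installed_name
--     return None
-- ===== SOURCE B (Python) =====
-- def _canonical_installed_plugin_name(plugin_name, installed_names):
--     installed = {name for name in installed_names if isinstance(name, str) and name}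
--     if plugin_name in installed:
--         return plugin_name
--     for i in range(len(plugin_name) - 1, 0, -1):
--         if plugin_name[i] == '-' and plugin_name[:i] in installed:
--             return plugin_name[:i]
--     return None
-- ===== Notes on version B (the rewrite author's own statement) =====
-- stated objective: alternative
-- what changed: Instead of sorting all installed names by length and testing each with startswith, B scans plugin_name's dash positions from the right and does one set lookup per candidate prefix, so the installed collection is never sorted or scanned per query.
import Mathlib
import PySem

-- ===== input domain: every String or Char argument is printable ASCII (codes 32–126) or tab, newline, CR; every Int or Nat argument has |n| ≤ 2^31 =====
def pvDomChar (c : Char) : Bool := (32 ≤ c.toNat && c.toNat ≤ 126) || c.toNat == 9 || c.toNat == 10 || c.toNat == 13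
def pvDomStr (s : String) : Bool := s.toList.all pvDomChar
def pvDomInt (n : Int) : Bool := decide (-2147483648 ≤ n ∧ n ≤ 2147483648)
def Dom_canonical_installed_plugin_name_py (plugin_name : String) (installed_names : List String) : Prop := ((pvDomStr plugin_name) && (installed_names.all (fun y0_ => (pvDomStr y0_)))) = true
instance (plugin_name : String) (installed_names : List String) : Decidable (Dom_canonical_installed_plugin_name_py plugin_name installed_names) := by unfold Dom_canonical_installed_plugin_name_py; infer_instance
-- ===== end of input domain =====

-- B replaces A's sort-all-installed-names-then-startswith scan by one set lookup per
-- dash-boundary prefix of plugin_name, scanned from the longest prefix down (objective: alternative).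

-- ===== PORT A =====
-- the 'for installed_name in sorted(...): if plugin_name.startswith(installed_name + "-"): return installed_name' loop
def pyA_loop (plugin_name : String) : List String → Option String
  | [] => none
  | installed_name :: rest =>
    if PySem.Str.startswith plugin_name (installed_name ++ "-") then some installed_name
    else pyA_loop plugin_name rest

-- Note: PySem.Set (insertion order) feeds 'sorted' instead of CPython's hash order; ties under
-- the length key may be ordered differently, but the returned value does not depend on that
-- order (two matches of equal length are the same string — see pv_match_to_cond below).
def canonical_installed_plugin_name_py (plugin_name : String) (installed_names : List String) : Option String :=
  let installed : PySem.Set String :=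
    PySem.Set.ofList (installed_names.filter (fun name => name != ""))
  if PySem.Set.contains installed plugin_name then some plugin_name
  else pyA_loop plugin_name (PySem.List.sorted installed (fun n => PySem.Str.len n) true)

-- ===== PORT B =====
-- the 'for i in range(len(plugin_name)-1, 0, -1)' loop; cs[i]? and cs.take i are exactly
-- plugin_name[i] and plugin_name[:i] for these in-range nonnegative i
def altB_loop (cs : List Char) (installed : PySem.Set String) : Nat → Option String
  | 0 => none
  | i + 1 =>
    if cs[i+1]? == some '-' && PySem.Set.contains installed (String.ofList (cs.take (i+1))) then
      some (String.ofList (cs.take (i+1)))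
    else altB_loop cs installed i

def canonical_installed_plugin_name_py_alt (plugin_name : String) (installed_names : List String) : Option String :=
  let installed : PySem.Set String :=
    PySem.Set.ofList (installed_names.filter (fun name => name != ""))
  if PySem.Set.contains installed plugin_name then some plugin_name
  else altB_loop plugin_name.toList installed (plugin_name.toList.length - 1)

-- ===== PRECONDITION & SPEC =====
def Spec_canonical_installed_plugin_name_py (plugin_name : String) (installed_names : List String) (out : Option String) : Prop := out = canonical_installed_plugin_name_py_alt plugin_name installed_names
instance (plugin_name : String) (installed_names : List String) (out : Option String) : Decidable (Spec_canonical_installed_plugin_name_py plugin_name installed_names out) := by unfold Spec_canonical_installed_plugin_name_py; infer_instance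

-- ===== CLAIM (what is proved, stated in full; the proofs are below) =====
def Claim_equal_canonical_installed_plugin_name_py : Prop := ∀ (plugin_name : String) (installed_names : List String), Dom_canonical_installed_plugin_name_py plugin_name installed_names → Spec_canonical_installed_plugin_name_py plugin_name installed_names (canonical_installed_plugin_name_py plugin_name installed_names)

-- ===== LEMMAS AND PROOFS =====

-- the condition B's loop tests at index i
def pvCond (cs : List Char) (S : List String) (i : Nat) : Prop :=
  cs[i]? = some '-' ∧ String.ofList (cs.take i) ∈ S

-- the Bool condition in altB_loop is pvCond
lemma pv_cond_bool (cs : List Char) (S : List String) (i : Nat) :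
    ((cs[i]? == some '-' && PySem.Set.contains S (String.ofList (cs.take i))) = true)
      ↔ pvCond cs S i := by
  unfold pvCond PySem.Set.contains
  simp

-- A's loop is find? over the sorted list
lemma pyA_loop_eq_find? (p : String) (L : List String) :
    pyA_loop p L = L.find? (fun n => PySem.Str.startswith p (n ++ "-")) := by
  induction L with
  | nil => rfl
  | cons x t ih => simp [pyA_loop, List.find?, ih]; split <;> simp_all

-- on a length-descending list, find? returns a match of maximal key
lemma pv_find_desc_max (f : String → Int) (q : String → Bool) :
    ∀ (L : List String), L.Pairwise (fun a b => f b ≤ f a) →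
      ∀ {n : String}, L.find? q = some n → ∀ m ∈ L, q m = true → f m ≤ f n := by
  intro L
  induction L with
  | nil => intro _ n h; simp at h
  | cons x t ih =>
    intro hp n hfind m hm hq
    rw [List.pairwise_cons] at hp
    by_cases hx : q x = true
    · rw [List.find?_cons_of_pos hx] at hfind
      obtain rfl : x = n := by injection hfind
      rcases List.mem_cons.mp hm with rfl | hmt
      · exact le_refl _
      · exact hp.1 m hmt
    · rw [List.find?_cons_of_neg (by simpa using hx)] at hfind
      rcases List.mem_cons.mp hm with rfl | hmt
      · exact absurd hq hx
      · exact ih hp.2 hfind m hmt hq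

-- a name match of A gives B's index condition at i = |n|
lemma pv_match_to_cond (p n : String) (S : List String) (hmem : n ∈ S)
    (h : PySem.Str.startswith p (n ++ "-") = true) :
    pvCond p.toList S n.toList.length ∧ p.toList.take n.toList.length = n.toList := by
  have hpre : (n.toList ++ ['-']) <+: p.toList := by
    simpa [PySem.Chars.startswith_iff] using h
  have htake : n.toList ++ ['-'] = p.toList.take (n.toList.length + 1) := by
    have := List.prefix_iff_eq_take.mp hpre
    simpa using this
  have htk : p.toList.take n.toList.length = n.toList := by
    have h1 : (p.toList.take (n.toList.length + 1)).take n.toList.length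
        = p.toList.take n.toList.length := by
      rw [List.take_take]; congr 1; omega
    rw [← h1, ← htake]
    simp
  have hget : p.toList[n.toList.length]? = some '-' := by
    have h2 : (n.toList ++ ['-'])[n.toList.length]? = some '-' := by simp
    rw [htake] at h2
    rwa [List.getElem?_take_of_lt (by omega)] at h2
  refine ⟨⟨hget, ?_⟩, htk⟩
  rw [htk]
  simpa using hmem

-- B's index condition at i gives a name match for A, of length i, in S
lemma pv_cond_to_match (p : String) (S : List String) (i : Nat) (h : pvCond p.toList S i) :
    String.ofList (p.toList.take i) ∈ S ∧
      PySem.Str.startswith p (String.ofList (p.toList.take i) ++ "-") = true ∧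
      (String.ofList (p.toList.take i)).toList.length = i := by
  obtain ⟨hget, hmem⟩ := h
  have hi : i < p.toList.length := (List.getElem?_eq_some_iff.mp hget).1
  have hgetE : p.toList[i] = '-' := by
    have := List.getElem?_eq_some_iff.mp hget
    exact this.2
  refine ⟨hmem, ?_, by simp [List.length_take_of_le hi.le]⟩
  have hpre : p.toList.take i ++ ['-'] <+: p.toList := by
    have h2 : p.toList.take (i + 1) = p.toList.take i ++ [p.toList[i]] :=
      List.take_succ_eq_append_getElem hi
    rw [hgetE] at h2
    rw [← h2]
    exact List.take_prefix _ _
  simp only [PySem.Str.startswith_eq]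
  rw [PySem.Chars.startswith_iff]
  simpa using hpre

-- B's loop returns none exactly when no index in [1, k] satisfies the condition
lemma altB_loop_none_iff (cs : List Char) (S : List String) :
    ∀ k, altB_loop cs S k = none ↔ ∀ j, 1 ≤ j → j ≤ k → ¬ pvCond cs S j := by
  intro k
  induction k with
  | zero =>
    constructor
    · intro _ j h1 h2 _; omega
    · intro _; rfl
  | succ i ih =>
    by_cases hcond : pvCond cs S (i + 1)
    · rw [altB_loop, if_pos ((pv_cond_bool cs S (i + 1)).mpr hcond)]
      constructor
      · intro h; exact absurd h (by simp)
      · intro h; exact absurd hcond (h (i + 1) (by omega) (le_refl _))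
    · rw [altB_loop, if_neg (fun hb => hcond ((pv_cond_bool cs S (i + 1)).mp hb)), ih]
      constructor
      · intro h j h1 h2
        rcases Nat.lt_or_ge j (i + 1) with hj | hj
        · exact h j h1 (by omega)
        · have : j = i + 1 := by omega
          subst this; exact hcond
      · intro h j h1 h2; exact h j h1 (by omega)

-- B's loop returns the prefix at the LARGEST qualifying index ≤ k
lemma altB_loop_some (cs : List Char) (S : List String) :
    ∀ k r, altB_loop cs S k = some r →
      ∃ i, 1 ≤ i ∧ i ≤ k ∧ pvCond cs S i ∧ r = String.ofList (cs.take i) ∧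
        ∀ j, 1 ≤ j → j ≤ k → pvCond cs S j → j ≤ i := by
  intro k
  induction k with
  | zero => intro r h; exact absurd h (by simp [altB_loop])
  | succ i ih =>
    intro r h
    by_cases hcond : pvCond cs S (i + 1)
    · rw [altB_loop, if_pos ((pv_cond_bool cs S (i + 1)).mpr hcond)] at h
      refine ⟨i + 1, by omega, le_refl _, hcond, by injection h with h'; exact h'.symm,
        fun j _ h2 _ => h2⟩
    · rw [altB_loop, if_neg (fun hb => hcond ((pv_cond_bool cs S (i + 1)).mp hb))] at h
      obtain ⟨i', h1, hik, hc, hr, hmax⟩ := ih r h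
      refine ⟨i', h1, by omega, hc, hr, fun j hj1 hj2 hjc => ?_⟩
      rcases Nat.lt_or_ge j (i + 1) with hj | hj
      · exact hmax j hj1 (by omega) hjc
      · have : j = i + 1 := by omega
        subst this; exact absurd hjc hcond

-- core: with every member of S nonempty, A's sorted scan equals B's boundary scan
lemma pv_core (p : String) (S : List String) (hS : ∀ n ∈ S, n ≠ "") :
    pyA_loop p (PySem.List.sorted S (fun n => PySem.Str.len n) true)
      = altB_loop p.toList S (p.toList.length - 1) := by
  have hq := pyA_loop_eq_find? p (PySem.List.sorted S (fun n => PySem.Str.len n) true)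
  cases hA : pyA_loop p (PySem.List.sorted S (fun n => PySem.Str.len n) true) with
  | none =>
    cases hB : altB_loop p.toList S (p.toList.length - 1) with
    | none => rfl
    | some r =>
      exfalso
      obtain ⟨i, h1, hik, hcond, hr, _⟩ := altB_loop_some p.toList S _ r hB
      obtain ⟨hmem, hsw, hlen⟩ := pv_cond_to_match p S i hcond
      have hnone := List.find?_eq_none.mp (hq ▸ hA)
      exact absurd hsw (by
        simpa using hnone _ ((PySem.List.mem_sorted S _ true _).mpr hmem))
  | some n =>
    rw [hq] at hA
    have hqn : PySem.Str.startswith p (n ++ "-") = true := by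
      simpa using List.find?_some hA
    have hnS : n ∈ S := (PySem.List.mem_sorted S _ true n).mp (List.mem_of_find?_eq_some hA)
    obtain ⟨hcondn, htk⟩ := pv_match_to_cond p n S hnS hqn
    have hne : n.toList ≠ [] := fun hE => hS n hnS (String.toList_eq_nil_iff.mp hE)
    have h1n : 1 ≤ n.toList.length := by
      cases hL : n.toList with
      | nil => exact absurd hL hne
      | cons _ _ => simp
    have hin : n.toList.length < p.toList.length :=
      (List.getElem?_eq_some_iff.mp hcondn.1).1
    have hkn : n.toList.length ≤ p.toList.length - 1 := by omega
    cases hB : altB_loop p.toList S (p.toList.length - 1) with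
    | none =>
      exact absurd hcondn ((altB_loop_none_iff p.toList S _).mp hB _ h1n hkn)
    | some r =>
      obtain ⟨i, h1, hik, hcond, hr, hmax⟩ := altB_loop_some p.toList S _ r hB
      have hle1 : n.toList.length ≤ i := hmax _ h1n hkn hcondn
      obtain ⟨hmemI, hswI, hlenI⟩ := pv_cond_to_match p S i hcond
      have hle2 : i ≤ n.toList.length := by
        have hmax' := pv_find_desc_max (fun n => PySem.Str.len n)
          (fun n => PySem.Str.startswith p (n ++ "-")) _
          (PySem.List.sorted_pairwise_rev S _) hA _
          ((PySem.List.mem_sorted S _ true _).mpr hmemI) hswI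
        have hnp : n.length < p.length := by simpa using hin
        have hln : i ≤ n.length := by
          rcases (by simpa using hmax' : i ≤ n.length ∨ p.length ≤ n.length) with h | h
          · exact h
          · omega
        simpa using hln
      have hieq : i = n.toList.length := le_antisymm hle2 hle1
      rw [hr, hieq, htk, String.ofList_toList]

-- ===== VERDICT (by name: the statement is the Claim_ definition above) =====
theorem canonical_installed_plugin_name_py_spec : Claim_equal_canonical_installed_plugin_name_py := by
  intro p names _
  unfold Spec_canonical_installed_plugin_name_py
  unfold canonical_installed_plugin_name_py canonical_installed_plugin_name_py_alt
  dsimp only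
  by_cases hc :
      PySem.Set.contains (PySem.Set.ofList (List.filter (fun name => name != "") names)) p = true
  · rw [if_pos hc, if_pos hc]
  · rw [if_neg hc, if_neg hc]
    refine pv_core p _ (fun n hn => ?_)
    have hmem : n ∈ List.filter (fun name => name != "") names :=
      (PySem.Set.mem_ofList _ _).mp hn
    simpa using (List.mem_filter.mp hmem).2
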